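-- pv_equiv track=rewrite | github.com/clair3st/code-katas | src/string_pyramid.py | watch_pyramid_from_above
-- ===== SOURCE A (Python) =====
-- def watch_pyramid_from_above(chars):
--     """View the pyramid from above."""
--     if chars:
--         result = []
--         odd = [x * 2 + 1 for x in reversed(range(len(chars)))]
--         odd.extend(odd[:-1][::-1])
--         chars += chars[:-1][::-1]
--         for i, x in enumerate(chars):
--             layer = x * odd[i]
--             space = (odd[0] - len(layer)) // 2
--             result.append(chars[:space] + layer + chars[:space][::-1])
--         return '\n'.join(result)
--     return chars
-- ===== SOURCE B (Python) =====
-- def watch_pyramid_from_above(chars):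
--     """View the pyramid from above."""
--     if not chars:
--         return chars
--     size = 2 * len(chars) - 1
--     top = [chars[:i] + chars[i] * (size - 2 * i) + chars[:i][::-1]
--            for i in range(len(chars))]
--     return '\n'.join(top + top[:-1][::-1])
-- ===== Notes on version B (the rewrite author's own statement) =====
-- stated objective: alternative
-- what changed: Drops A's odd-widths array, string doubling and enumerate loop: B builds each top-half row directly as prefix + centre run + mirrored prefix from the closed-form ring index and mirrors the row list for the bottom half.
import Mathlib
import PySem

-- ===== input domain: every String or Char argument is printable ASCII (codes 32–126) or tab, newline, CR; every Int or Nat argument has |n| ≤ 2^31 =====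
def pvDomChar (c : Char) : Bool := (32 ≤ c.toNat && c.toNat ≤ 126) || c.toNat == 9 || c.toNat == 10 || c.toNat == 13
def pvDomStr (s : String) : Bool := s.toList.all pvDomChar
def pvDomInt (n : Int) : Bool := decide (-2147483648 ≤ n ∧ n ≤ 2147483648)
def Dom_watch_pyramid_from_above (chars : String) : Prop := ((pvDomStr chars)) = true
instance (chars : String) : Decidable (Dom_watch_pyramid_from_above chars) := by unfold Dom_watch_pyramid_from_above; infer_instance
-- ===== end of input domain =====

-- B drops A's odd-widths array, string doubling and enumerate: it builds only the top half of the
-- rows with a closed-form prefix + centre-run + mirrored-prefix expression and mirrors the row list.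


-- ===== PORT A =====
-- literal transliteration of A; s[::-1] ported as .reverse (PySem.List.slice?_none_none_neg_one);
-- odd[i] / odd[0] ported with pyGetD: the indices are always in range (len(odd) = len(chars) after extension)
def watch_pyramid_from_above (chars : String) : String :=
  let cs := chars.toList
  if cs ≠ [] then
    -- odd = [x * 2 + 1 for x in reversed(range(len(chars)))]
    let odd0 : List Int := ((PySem.List.pyRange 0 (cs.length : Int)).reverse).map (fun x => x * 2 + 1)
    -- odd.extend(odd[:-1][::-1])
    let odd := odd0 ++ (PySem.List.slice odd0 none (some (-1))).reverse
    -- chars += chars[:-1][::-1]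
    let cs2 := cs ++ (PySem.List.slice cs none (some (-1))).reverse
    -- for i, x in enumerate(chars): result.append(chars[:space] + layer + chars[:space][::-1])
    let result := (PySem.List.enumerate cs2).foldl (fun acc p =>
      let layer := PySem.List.pyRepeat [p.2] (PySem.List.pyGetD odd p.1 0)
      let space := PySem.Int.floordiv (PySem.List.pyGetD odd 0 0 - (layer.length : Int)) 2
      acc ++ [PySem.List.slice cs2 none (some space) ++ layer ++
              (PySem.List.slice cs2 none (some space)).reverse]) []
    String.ofList (PySem.Chars.join ['\n'] result)
  else chars

-- ===== PORT B =====
-- literal transliteration of Source B; chars[i] ported with getD (i < len(chars)); chars[:i] as take,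
-- chars[i] * (size - 2*i) as List.replicate (the count is the same Nat value as Python's int there)
def watch_pyramid_from_above_alt (chars : String) : String :=
  let cs := chars.toList
  if cs = [] then chars
  else
    let size := 2 * cs.length - 1
    let top := (List.range cs.length).map (fun i =>
      cs.take i ++ List.replicate (size - 2 * i) (cs.getD i 'a') ++ (cs.take i).reverse)
    String.ofList (PySem.Chars.join ['\n'] (top ++ top.dropLast.reverse))

-- ===== PRECONDITION & SPEC =====
def Spec_watch_pyramid_from_above (chars : String) (out : String) : Prop := out = watch_pyramid_from_above_alt chars
instance (chars : String) (out : String) : Decidable (Spec_watch_pyramid_from_above chars out) := by unfold Spec_watch_pyramid_from_above; infer_instance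

-- ===== CLAIM (what is proved, stated in full; the proofs are below) =====
def Claim_equal_watch_pyramid_from_above : Prop := ∀ (chars : String), Dom_watch_pyramid_from_above chars → Spec_watch_pyramid_from_above chars (watch_pyramid_from_above chars)

-- ===== LEMMAS AND PROOFS =====

lemma pv_odd0_len (n : Nat) :
    (((PySem.List.pyRange 0 (n : Int)).reverse).map (fun x => x * 2 + 1)).length = n := by
  simp [PySem.List.length_pyRange_one]

lemma pv_odd0_get (n j : Nat) (_hj : j < n)
    (h' : j < (((PySem.List.pyRange 0 (n : Int)).reverse).map (fun x : Int => x * 2 + 1)).length) :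
    (((PySem.List.pyRange 0 (n : Int)).reverse).map (fun x : Int => x * 2 + 1))[j]
      = ((n - 1 - j : Nat) : Int) * 2 + 1 := by
  have hlen : (PySem.List.pyRange 0 (n : Int)).length = n := by
    simp [PySem.List.length_pyRange_one]
  rw [List.getElem_map, List.getElem_reverse, PySem.List.getElem_pyRange_one]
  rw [hlen]; omega

lemma pv_odd_getD (n i : Nat) (hn : 0 < n) (hi : i < 2 * n - 1) :
    ((((PySem.List.pyRange 0 (n : Int)).reverse).map (fun x => x * 2 + 1)) ++
      ((((PySem.List.pyRange 0 (n : Int)).reverse).map (fun x => x * 2 + 1)).dropLast).reverse).getD i 0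
      = ((2 * n - 1 - 2 * min i (2 * n - 1 - 1 - i) : Nat) : Int) := by
  set L := (((PySem.List.pyRange 0 (n : Int)).reverse).map (fun x : Int => x * 2 + 1)) with hL
  have hlen : L.length = n := pv_odd0_len n
  have hlen2 : (L ++ L.dropLast.reverse).length = 2 * n - 1 := by
    simp [hlen]; omega
  rw [List.getD_eq_getElem _ _ (by omega)]
  by_cases hcase : i < n
  · rw [List.getElem_append_left (by omega), pv_odd0_get n i hcase]
    omega
  · rw [List.getElem_append_right (by omega)]
    rw [List.getElem_reverse, List.getElem_dropLast, pv_odd0_get n _ (by simp [hlen]; omega)]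
    · simp [hlen]
      omega

lemma pv_cs2_getD (cs : List Char) (i : Nat) (h : cs ≠ []) (hi : i < 2 * cs.length - 1) :
    (cs ++ cs.dropLast.reverse).getD i 'a'
      = cs.getD (min i (2 * cs.length - 1 - 1 - i)) 'a' := by
  have hn : 0 < cs.length := List.length_pos_of_ne_nil h
  have hlen2 : (cs ++ cs.dropLast.reverse).length = 2 * cs.length - 1 := by simp; omega
  rw [List.getD_eq_getElem _ _ (by omega), List.getD_eq_getElem _ _ (by omega)]
  by_cases hcase : i < cs.length
  · rw [List.getElem_append_left (by omega)]
    congr 1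
    omega
  · rw [List.getElem_append_right (by omega), List.getElem_reverse, List.getElem_dropLast]
    congr 1
    simp
    omega

-- ===== VERDICT (by name: the statement is the Claim_ definition above) =====
theorem watch_pyramid_from_above_spec : Claim_equal_watch_pyramid_from_above := by
  intro chars _dom
  unfold Spec_watch_pyramid_from_above watch_pyramid_from_above watch_pyramid_from_above_alt
  by_cases h : chars.toList = []
  · simp [h]
  · set cs := chars.toList
    have hn : 0 < cs.length := List.length_pos_of_ne_nil h
    simp only [if_neg h, if_pos h, ne_eq, PySem.List.slice_to_neg_one]
    congr 1
    congr 1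
    -- rows of A as a map over the index range
    rw [PySem.List.enumerate_eq_map_pyRange _ 'a', List.foldl_map,
        PySem.List.foldl_append_singleton_eq_map]
    have hlen2 : (cs ++ cs.dropLast.reverse).length = 2 * cs.length - 1 := by simp; omega
    have hlen : PySem.List.len (cs ++ cs.dropLast.reverse) = ((2 * cs.length - 1 : Nat) : Int) := by
      simp [PySem.List.len_eq, hlen2]
    rw [hlen]
    simp only [List.nil_append]
    apply List.ext_getElem
    · simp [PySem.List.length_pyRange_one]; omega
    · intro k h1 h2
      have hk' : k < 2 * cs.length - 1 := by
        simpa [PySem.List.length_pyRange_one] using h1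
      rw [List.getElem_map, PySem.List.getElem_pyRange_one]
      simp only [zero_add, PySem.List.pyGetD_natCast, PySem.List.pyGetD_zero,
        PySem.List.pyRepeat_singleton]
      rw [pv_cs2_getD cs k h hk', pv_odd_getD cs.length k hn hk',
          pv_odd_getD cs.length 0 hn (by omega)]
      simp only [Int.toNat_natCast, List.length_replicate]
      have hspace : PySem.Int.floordiv
          (((2 * cs.length - 1 - 2 * min 0 (2 * cs.length - 1 - 1 - 0) : Nat) : Int) -
            ((2 * cs.length - 1 - 2 * min k (2 * cs.length - 1 - 1 - k) : Nat) : Int)) 2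
          = ((min k (2 * cs.length - 1 - 1 - k) : Nat) : Int) := by
        rw [PySem.Int.floordiv_eq_ediv_of_pos (by norm_num)]
        omega
      rw [hspace, PySem.List.slice_to_natCast,
          List.take_append_of_le_length (by omega)]
      have htoplen : ((List.range cs.length).map (fun i =>
          cs.take i ++ List.replicate (2 * cs.length - 1 - 2 * i) (cs.getD i 'a') ++
            (cs.take i).reverse)).length = cs.length := by simp
      by_cases hcase : k < cs.length
      · rw [List.getElem_append_left (by rw [htoplen]; omega), List.getElem_map,
            List.getElem_range]
        have hmin : min k (2 * cs.length - 1 - 1 - k) = k := by omega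
        rw [hmin]
      · rw [List.getElem_append_right (by rw [htoplen]; omega), List.getElem_reverse,
            List.getElem_dropLast, List.getElem_map, List.getElem_range]
        have hmin : min k (2 * cs.length - 1 - 1 - k) =
            ((List.range cs.length).map (fun i =>
              cs.take i ++ List.replicate (2 * cs.length - 1 - 2 * i) (cs.getD i 'a') ++
                (cs.take i).reverse)).dropLast.length - 1 - (k - ((List.range cs.length).map (fun i =>
              cs.take i ++ List.replicate (2 * cs.length - 1 - 2 * i) (cs.getD i 'a') ++
                (cs.take i).reverse)).length) := by
          simp; omega
        rw [hmin]
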